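-- pv_equiv track=rewrite | github.com/Manas-Kandi/procur-algorithm | src/procur/services/vendor_matching.py | _category_matches
-- ===== SOURCE A (Python) =====
-- from typing import Dict, Iterable, List, Optional, Sequence, Tuple
--
-- CATEGORY_ALIASES: Dict[str, Sequence[str]] = {
--     "crm": ("saas/crm", "crm", "customer-relationship-management", "sales"),
--     "hr": ("saas/hr", "hr", "human-resources", "payroll", "benefits"),
--     "security": ("saas/security", "security", "cybersecurity", "infosec"),
--     "analytics": ("saas/analytics", "analytics", "business-intelligence", "bi"),
--     "erp": ("saas/erp", "erp", "enterprise-resource-planning", "finance"),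
-- }
--
-- def _normalise_category(value: str) -> str:
--     return value.strip().lower().replace(" ", "-")
--
-- def _category_matches(request_category: str, vendor_category: str) -> bool:
--     req = _normalise_category(request_category)
--     vend = _normalise_category(vendor_category)
--     if req == vend:
--         return True
--     for aliases in CATEGORY_ALIASES.values():
--         norm_aliases = {_normalise_category(alias) for alias in aliases}
--         if req in norm_aliases and vend in norm_aliases:
--             return True
--     return False
-- ===== SOURCE B (Python) =====
-- CATEGORY_ALIASES = {
--     "crm": ("saas/crm", "crm", "customer-relationship-management", "sales"),
--     "hr": ("saas/hr", "hr", "human-resources", "payroll", "benefits"),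
--     "security": ("saas/security", "security", "cybersecurity", "infosec"),
--     "analytics": ("saas/analytics", "analytics", "business-intelligence", "bi"),
--     "erp": ("saas/erp", "erp", "enterprise-resource-planning", "finance"),
-- }
--
-- def _normalise_category(value: str) -> str:
--     return value.strip().lower().replace(" ", "-")
--
-- ALIAS_TO_GROUP = {
--     _normalise_category(alias): group
--     for group, aliases in CATEGORY_ALIASES.items()
--     for alias in aliases
-- }
--
-- def _category_matches(request_category: str, vendor_category: str) -> bool:
--     req = _normalise_category(request_category)
--     vend = _normalise_category(vendor_category)
--     if req == vend:
--         return True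
--     group = ALIAS_TO_GROUP.get(req)
--     return group is not None and group == ALIAS_TO_GROUP.get(vend)
-- ===== Notes on version B (the rewrite author's own statement) =====
-- stated objective: idiomatic
-- what changed: Replaced the per-call loop over alias groups (rebuilding a normalized set for each group) with a module-level inverted index mapping each normalized alias to its group, so the function does two dict lookups.
import Mathlib
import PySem

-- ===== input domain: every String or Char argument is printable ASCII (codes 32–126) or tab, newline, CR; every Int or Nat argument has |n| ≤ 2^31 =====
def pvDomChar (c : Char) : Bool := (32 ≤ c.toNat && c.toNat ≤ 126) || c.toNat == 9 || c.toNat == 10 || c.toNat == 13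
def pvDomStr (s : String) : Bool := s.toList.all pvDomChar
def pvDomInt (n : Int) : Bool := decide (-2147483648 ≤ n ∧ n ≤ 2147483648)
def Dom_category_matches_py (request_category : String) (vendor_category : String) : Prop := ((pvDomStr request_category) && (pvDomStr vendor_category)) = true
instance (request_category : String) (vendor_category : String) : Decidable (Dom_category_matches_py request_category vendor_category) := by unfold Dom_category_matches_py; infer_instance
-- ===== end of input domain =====

-- B replaces A's per-call loop over alias groups with a precomputed inverted index
-- (normalized alias -> group key), so each call does two dict lookups (idiomatic).

-- module-level helpers shared by both Pythons
def pvNormaliseCategory (value : String) : String :=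
  PySem.Str.replace (PySem.Str.lower (PySem.Str.strip value)) " " "-"

def pvCategoryAliases : PySem.Dict String (List String) :=
  PySem.Dict.ofList [
    ("crm", ["saas/crm", "crm", "customer-relationship-management", "sales"]),
    ("hr", ["saas/hr", "hr", "human-resources", "payroll", "benefits"]),
    ("security", ["saas/security", "security", "cybersecurity", "infosec"]),
    ("analytics", ["saas/analytics", "analytics", "business-intelligence", "bi"]),
    ("erp", ["saas/erp", "erp", "enterprise-resource-planning", "finance"])]

-- ===== PORT A =====
def category_matches_py (request_category : String) (vendor_category : String) : Bool :=
  let req := pvNormaliseCategory request_category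
  let vend := pvNormaliseCategory vendor_category
  if req == vend then true
  else
    (PySem.Dict.values pvCategoryAliases).foldl
      (fun found aliases =>
        found ||
          (let normAliases := PySem.Set.ofList (aliases.map pvNormaliseCategory)
           PySem.Set.contains normAliases req && PySem.Set.contains normAliases vend))
      false

-- ===== PORT B =====
-- ALIAS_TO_GROUP: inverted index built once from CATEGORY_ALIASES (dict comprehension -> fold)
def pvAliasToGroup : PySem.Dict String String :=
  (PySem.Dict.items pvCategoryAliases).foldl
    (fun d p => p.2.foldl (fun d a => d.insert (pvNormaliseCategory a) p.1) d)
    PySem.Dict.empty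

def category_matches_py_alt (request_category : String) (vendor_category : String) : Bool :=
  let req := pvNormaliseCategory request_category
  let vend := pvNormaliseCategory vendor_category
  if req == vend then true
  else
    match PySem.Dict.get? pvAliasToGroup req with
    | none => false
    | some group => PySem.Dict.get? pvAliasToGroup vend == some group

-- ===== PRECONDITION & SPEC =====
def Spec_category_matches_py (request_category : String) (vendor_category : String) (out : Bool) : Prop := out = category_matches_py_alt request_category vendor_category
instance (request_category : String) (vendor_category : String) (out : Bool) : Decidable (Spec_category_matches_py request_category vendor_category out) := by unfold Spec_category_matches_py; infer_instance

-- ===== CLAIM (what is proved, stated in full; the proofs are below) =====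
def Claim_equal_category_matches_py : Prop := ∀ (request_category : String) (vendor_category : String), Dom_category_matches_py request_category vendor_category → Spec_category_matches_py request_category vendor_category (category_matches_py request_category vendor_category)

-- ===== LEMMAS AND PROOFS =====

set_option maxRecDepth 40000 in
lemma pvAliasToGroup_eq : pvAliasToGroup = PySem.Dict.mk
    [("saas/crm", "crm"), ("crm", "crm"), ("customer-relationship-management", "crm"), ("sales", "crm"),
     ("saas/hr", "hr"), ("hr", "hr"), ("human-resources", "hr"), ("payroll", "hr"), ("benefits", "hr"),
     ("saas/security", "security"), ("security", "security"), ("cybersecurity", "security"), ("infosec", "security"),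
     ("saas/analytics", "analytics"), ("analytics", "analytics"), ("business-intelligence", "analytics"), ("bi", "analytics"),
     ("saas/erp", "erp"), ("erp", "erp"), ("enterprise-resource-planning", "erp"), ("finance", "erp")] := by
  rfl

set_option maxRecDepth 40000 in
lemma pv_keys_nodup : (PySem.Dict.keys pvAliasToGroup).Nodup := by
  rw [pvAliasToGroup_eq]; decide

-- the lookup can only return one of the five group keys
lemma pv_cls_cases (s : String) :
    PySem.Dict.get? pvAliasToGroup s = none ∨ PySem.Dict.get? pvAliasToGroup s = some "crm" ∨
    PySem.Dict.get? pvAliasToGroup s = some "hr" ∨ PySem.Dict.get? pvAliasToGroup s = some "security" ∨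
    PySem.Dict.get? pvAliasToGroup s = some "analytics" ∨ PySem.Dict.get? pvAliasToGroup s = some "erp" := by
  cases heq : PySem.Dict.get? pvAliasToGroup s with
  | none => exact Or.inl rfl
  | some g =>
    have hm := PySem.Dict.mem_items_of_get?_eq_some _ heq
    rw [pvAliasToGroup_eq] at hm
    simp only [List.mem_cons, List.not_mem_nil, or_false, Prod.mk.injEq] at hm
    rcases hm with ⟨_, h⟩|⟨_, h⟩|⟨_, h⟩|⟨_, h⟩|⟨_, h⟩|⟨_, h⟩|⟨_, h⟩|⟨_, h⟩|⟨_, h⟩|⟨_, h⟩|⟨_, h⟩|⟨_, h⟩|⟨_, h⟩|⟨_, h⟩|⟨_, h⟩|⟨_, h⟩|⟨_, h⟩|⟨_, h⟩|⟨_, h⟩|⟨_, h⟩|⟨_, h⟩ <;>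
      subst h <;> simp

set_option maxRecDepth 40000 in
-- membership in a group's normalized alias set = the index maps to that group
lemma pv_mem_group (s : String) (g : String) (aliases : List String)
    (hsub : ∀ a ∈ aliases, (a, g) ∈ (PySem.Dict.items pvAliasToGroup))
    (hrev : ∀ p ∈ (PySem.Dict.items pvAliasToGroup), p.2 = g → p.1 ∈ aliases) :
    PySem.Set.contains aliases s = (PySem.Dict.get? pvAliasToGroup s == some g) := by
  rw [Bool.eq_iff_iff]
  simp only [beq_iff_eq, PySem.Set.contains_iff]
  constructor
  · intro hmem
    exact PySem.Dict.get?_of_mem_items _ (hsub s hmem) pv_keys_nodup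
  · intro h
    exact hrev (s, g) (PySem.Dict.mem_items_of_get?_eq_some _ h) rfl

set_option maxRecDepth 40000 in
lemma pv_values_eq : PySem.Dict.values pvCategoryAliases =
    [["saas/crm", "crm", "customer-relationship-management", "sales"],
     ["saas/hr", "hr", "human-resources", "payroll", "benefits"],
     ["saas/security", "security", "cybersecurity", "infosec"],
     ["saas/analytics", "analytics", "business-intelligence", "bi"],
     ["saas/erp", "erp", "enterprise-resource-planning", "finance"]] := by rfl

set_option maxRecDepth 40000 in
lemma pv_set1 : PySem.Set.ofList (["saas/crm", "crm", "customer-relationship-management", "sales"].map pvNormaliseCategory) = ["saas/crm", "crm", "customer-relationship-management", "sales"] := by rfl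
set_option maxRecDepth 40000 in
lemma pv_set2 : PySem.Set.ofList (["saas/hr", "hr", "human-resources", "payroll", "benefits"].map pvNormaliseCategory) = ["saas/hr", "hr", "human-resources", "payroll", "benefits"] := by rfl
set_option maxRecDepth 40000 in
lemma pv_set3 : PySem.Set.ofList (["saas/security", "security", "cybersecurity", "infosec"].map pvNormaliseCategory) = ["saas/security", "security", "cybersecurity", "infosec"] := by rfl
set_option maxRecDepth 40000 in
lemma pv_set4 : PySem.Set.ofList (["saas/analytics", "analytics", "business-intelligence", "bi"].map pvNormaliseCategory) = ["saas/analytics", "analytics", "business-intelligence", "bi"] := by rfl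
set_option maxRecDepth 40000 in
lemma pv_set5 : PySem.Set.ofList (["saas/erp", "erp", "enterprise-resource-planning", "finance"].map pvNormaliseCategory) = ["saas/erp", "erp", "enterprise-resource-planning", "finance"] := by rfl

set_option maxRecDepth 40000 in
lemma pv_mem1 (s : String) : PySem.Set.contains ["saas/crm", "crm", "customer-relationship-management", "sales"] s = (PySem.Dict.get? pvAliasToGroup s == some "crm") :=
  pv_mem_group s "crm" _ (by rw [pvAliasToGroup_eq]; decide) (by rw [pvAliasToGroup_eq]; decide)
set_option maxRecDepth 40000 in
lemma pv_mem2 (s : String) : PySem.Set.contains ["saas/hr", "hr", "human-resources", "payroll", "benefits"] s = (PySem.Dict.get? pvAliasToGroup s == some "hr") :=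
  pv_mem_group s "hr" _ (by rw [pvAliasToGroup_eq]; decide) (by rw [pvAliasToGroup_eq]; decide)
set_option maxRecDepth 40000 in
lemma pv_mem3 (s : String) : PySem.Set.contains ["saas/security", "security", "cybersecurity", "infosec"] s = (PySem.Dict.get? pvAliasToGroup s == some "security") :=
  pv_mem_group s "security" _ (by rw [pvAliasToGroup_eq]; decide) (by rw [pvAliasToGroup_eq]; decide)
set_option maxRecDepth 40000 in
lemma pv_mem4 (s : String) : PySem.Set.contains ["saas/analytics", "analytics", "business-intelligence", "bi"] s = (PySem.Dict.get? pvAliasToGroup s == some "analytics") :=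
  pv_mem_group s "analytics" _ (by rw [pvAliasToGroup_eq]; decide) (by rw [pvAliasToGroup_eq]; decide)
set_option maxRecDepth 40000 in
lemma pv_mem5 (s : String) : PySem.Set.contains ["saas/erp", "erp", "enterprise-resource-planning", "finance"] s = (PySem.Dict.get? pvAliasToGroup s == some "erp") :=
  pv_mem_group s "erp" _ (by rw [pvAliasToGroup_eq]; decide) (by rw [pvAliasToGroup_eq]; decide)

-- ===== VERDICT (by name: the statement is the Claim_ definition above) =====
set_option maxHeartbeats 1000000 in
theorem category_matches_py_spec : Claim_equal_category_matches_py := by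
  intro a b _
  unfold Spec_category_matches_py category_matches_py category_matches_py_alt
  simp only []
  generalize pvNormaliseCategory a = r
  generalize pvNormaliseCategory b = v
  by_cases hrv : (r == v) = true
  · simp [hrv]
  · simp only [Bool.not_eq_true] at hrv
    simp only [hrv, Bool.false_eq_true, if_false]
    rw [pv_values_eq]
    simp only [List.foldl, Bool.false_or]
    rw [pv_set1, pv_set2, pv_set3, pv_set4, pv_set5,
        pv_mem1 r, pv_mem1 v, pv_mem2 r, pv_mem2 v, pv_mem3 r, pv_mem3 v,
        pv_mem4 r, pv_mem4 v, pv_mem5 r, pv_mem5 v]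
    rcases pv_cls_cases r with hr|hr|hr|hr|hr|hr <;>
      rcases pv_cls_cases v with hv|hv|hv|hv|hv|hv <;>
        simp [hr, hv]
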